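-- pv_equiv track=rewrite | github.com/AdrianSeguraOrtiz/MOEBA-BIO | utils/plot_autoconf.py | get_time_series_from_string
-- ===== SOURCE A (Python) =====
-- from collections import defaultdict
--
-- def get_time_series_from_string(data_dict, key):
--     # Obtener el vector de objetivos
--     values = data_dict[key]
--
--     # Diccionario para almacenar los resultados
--     result = defaultdict(lambda: [0] * len(values))
--
--     # Recorrer cada sublista
--     for i, sublist in enumerate(values):
--         # Si hay algún None en la sublista se continua
--         if None in sublist:
--             continue
--         # Procesar
--         for entry in sublist:
--             words = entry.split(';')  # Dividir por ';'
--             for word in words: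
--                 result[word][i] += 1  # Aumentar el contador en la posición correcta
--
--     # Convertir a dict (opcional, ya que defaultdict también funciona)
--     result = trim_zeros_from_dict(dict(result))
--
--     return list(result.keys()), list(result.values())
--
-- def trim_zeros_from_dict(dictionary):
--     # Encontrar la posición máxima donde al menos un valor no es 0
--     max_len = 0
--     for values in dictionary.values():
--         for i in range(len(values) - 1, -1, -1):
--             if values[i] != 0:
--                 max_len = max(max_len, i + 1)
--                 break
--
--     # Recortar todas las listas hasta la longitud encontrada
--     for key in dictionary:
--         dictionary[key] = dictionary[key][:max_len]
--
--     return dictionary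
-- ===== SOURCE B (Python) =====
-- def get_time_series_from_string(data_dict, key):
--     values = data_dict[key]
--
--     # Sparse counts: word -> {timestep index: count}, plus the highest used index + 1
--     counts = {}
--     max_used = 0
--     for i, sublist in enumerate(values):
--         if None in sublist:
--             continue
--         for entry in sublist:
--             for word in entry.split(';'):
--                 inner = counts.setdefault(word, {})
--                 inner[i] = inner.get(i, 0) + 1
--                 if i + 1 > max_used:
--                     max_used = i + 1
--
--     series = [[counts[w].get(j, 0) for j in range(max_used)] for w in counts]
--     return list(counts.keys()), series
-- ===== Notes on version B (the rewrite author's own statement) =====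
-- stated objective: alternative
-- what changed: B builds a sparse per-word dict keyed by timestep plus a running max-used index in the single pass, then materialises dense rows of that length at the end, instead of A's dense preallocated [0]*len(values) row per word followed by a separate backward trim-zeros pass.
import Mathlib
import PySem

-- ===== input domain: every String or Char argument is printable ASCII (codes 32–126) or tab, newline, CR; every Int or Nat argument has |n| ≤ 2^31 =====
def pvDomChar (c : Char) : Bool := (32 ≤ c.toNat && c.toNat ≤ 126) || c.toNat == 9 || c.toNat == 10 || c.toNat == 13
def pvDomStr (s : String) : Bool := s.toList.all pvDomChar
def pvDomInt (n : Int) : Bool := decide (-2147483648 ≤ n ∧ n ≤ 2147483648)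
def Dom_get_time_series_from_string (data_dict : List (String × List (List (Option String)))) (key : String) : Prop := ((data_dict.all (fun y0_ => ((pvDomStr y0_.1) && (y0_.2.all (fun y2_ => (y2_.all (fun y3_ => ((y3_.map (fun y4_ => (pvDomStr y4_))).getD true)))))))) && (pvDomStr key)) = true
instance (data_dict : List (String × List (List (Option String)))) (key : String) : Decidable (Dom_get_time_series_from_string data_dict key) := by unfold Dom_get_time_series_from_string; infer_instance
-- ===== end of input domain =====

-- B replaces A's dense preallocated per-word rows + separate backward trim pass with a
-- sparse per-word dict (timestep → count) and a running max-used index (objective: alternative).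

-- ===== PORT A =====

-- entry.split(';'): the separator ";" is nonempty so split? is always `some`; the `none`
-- entry case is unreachable (sublists containing None are skipped before the inner loop).
def pvWords (e : Option String) : List String :=
  match e with
  | some s => (PySem.Str.split? s ";").getD []
  | none => []

-- Python: for i in range(len(values)-1, -1, -1): if values[i] != 0: ... break
-- (first index from the end with a nonzero entry; find? on the descending range = loop with break)
def pvLastNZ (l : List Int) : Option Int :=
  (PySem.List.pyRange ((l.length : Int) - 1) (-1) (-1)).find? (fun i => decide (PySem.List.pyGetD l i 0 ≠ 0))

-- trim_zeros_from_dict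
def pvTrimZeros (d : PySem.Dict String (List Int)) : PySem.Dict String (List Int) :=
  let maxLen := d.values.foldl (fun m l => match pvLastNZ l with | some i => max m (i + 1) | none => m) 0
  PySem.Dict.mk (d.items.map (fun p => (p.1, PySem.List.slice p.2 none (some maxLen))))

def get_time_series_from_string (data_dict : List (String × List (List (Option String)))) (key : String) : List String × List (List Int) :=
  match (PySem.Dict.mk data_dict).get? key with
  | none => ([], [])   -- Python raises KeyError here; excluded by Pre_
  | some values =>
      -- result = defaultdict(lambda: [0]*len(values)); result[word][i] += 1
      let result :=
        (PySem.List.enumerate values 0).foldl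
          (fun d p =>
            if none ∈ p.2 then d
            else p.2.foldl (fun d e =>
              (pvWords e).foldl (fun d w =>
                d.insert w (PySem.List.pySetD (d.getD w (List.replicate values.length 0)) p.1
                  (PySem.List.pyGetD (d.getD w (List.replicate values.length 0)) p.1 0 + 1))) d) d)
          PySem.Dict.empty
      let trimmed := pvTrimZeros result
      (trimmed.keys, trimmed.values)

-- ===== PORT B =====
def get_time_series_from_string_alt (data_dict : List (String × List (List (Option String)))) (key : String) : List String × List (List Int) :=
  match (PySem.Dict.mk data_dict).get? key with
  | none => ([], [])   -- Python raises KeyError here; excluded by Pre_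
  | some values =>
      let st :=
        (PySem.List.enumerate values 0).foldl
          (fun (st : PySem.Dict String (PySem.Dict Int Int) × Int) p =>
            if none ∈ p.2 then st
            else p.2.foldl (fun st e =>
              (pvWords e).foldl (fun st w =>
                let inner := st.1.getD w PySem.Dict.empty
                (st.1.insert w (inner.insert p.1 (inner.getD p.1 0 + 1)),
                 if p.1 + 1 > st.2 then p.1 + 1 else st.2)) st) st)
          (PySem.Dict.empty, 0)
      -- counts[w] lookup: w ranges over the keys, so getD with the empty default is exact
      (st.1.keys, st.1.keys.map (fun w =>
        (PySem.List.pyRange 0 st.2 1).map (fun j => (st.1.getD w PySem.Dict.empty).getD j 0)))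

-- ===== PRECONDITION & SPEC =====
-- Pre_ excludes exactly the inputs on which Python's data_dict[key] raises KeyError.
def Pre_get_time_series_from_string (data_dict : List (String × List (List (Option String)))) (key : String) : Prop :=
  key ∈ data_dict.map Prod.fst
instance (data_dict : List (String × List (List (Option String)))) (key : String) : Decidable (Pre_get_time_series_from_string data_dict key) := by unfold Pre_get_time_series_from_string; infer_instance

def pvWitness_get_time_series_from_string : (List (String × List (List (Option String)))) × String :=
  ([("k", [[some "a;b"], [some "a"]])], "k")

def Spec_get_time_series_from_string (data_dict : List (String × List (List (Option String)))) (key : String) (out : List String × List (List Int)) : Prop := out = get_time_series_from_string_alt data_dict key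
instance (data_dict : List (String × List (List (Option String)))) (key : String) (out : List String × List (List Int)) : Decidable (Spec_get_time_series_from_string data_dict key out) := by unfold Spec_get_time_series_from_string; infer_instance

-- ===== CLAIM (what is proved, stated in full; the proofs are below) =====
def Claim_equal_get_time_series_from_string : Prop := ∀ (data_dict : List (String × List (List (Option String)))) (key : String), Dom_get_time_series_from_string data_dict key → Pre_get_time_series_from_string data_dict key → Spec_get_time_series_from_string data_dict key (get_time_series_from_string data_dict key)

-- ===== LEMMAS AND PROOFS =====

-- the loop step of A's triple loop, as a function of one (timestep, word) event
def pvStepA (n : Nat) (d : PySem.Dict String (List Int)) (q : Int × String) : PySem.Dict String (List Int) :=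
  d.insert q.2 (PySem.List.pySetD (d.getD q.2 (List.replicate n 0)) q.1
    (PySem.List.pyGetD (d.getD q.2 (List.replicate n 0)) q.1 0 + 1))

-- the loop step of B's triple loop
def pvStepB (st : PySem.Dict String (PySem.Dict Int Int) × Int) (q : Int × String) : PySem.Dict String (PySem.Dict Int Int) × Int :=
  let inner := st.1.getD q.2 PySem.Dict.empty
  (st.1.insert q.2 (inner.insert q.1 (inner.getD q.1 0 + 1)),
   if q.1 + 1 > st.2 then q.1 + 1 else st.2)

-- the flattened stream of (timestep, word) increment events both loops process in order
def pvEvents (values : List (List (Option String))) : List (Int × String) :=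
  (PySem.List.enumerate values 0).flatMap
    (fun p => if none ∈ p.2 then [] else p.2.flatMap (fun e => (pvWords e).map (fun w => (p.1, w))))

lemma pv_nested_fold {β : Type} (L : List (Int × List (Option String))) (g : β → (Int × String) → β) (s : β) :
    L.foldl (fun d p => if none ∈ p.2 then d else p.2.foldl (fun d e => (pvWords e).foldl (fun d w => g d (p.1, w)) d) d) s
  = (L.flatMap (fun p => if none ∈ p.2 then [] else p.2.flatMap (fun e => (pvWords e).map (fun w => (p.1, w))))).foldl g s := by
  rw [List.foldl_flatMap]
  refine PySem.List.foldl_congr_mem _ _ _ _ ?_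
  intro acc p _
  split
  · simp
  · rw [List.foldl_flatMap]
    refine PySem.List.foldl_congr_mem _ _ _ _ ?_
    intro acc e _
    rw [List.foldl_map]

lemma pv_enumerate_mem {α : Type} : ∀ (xs : List α) (k : Int) (p : Int × α),
    p ∈ PySem.List.enumerate xs k → k ≤ p.1 ∧ p.1 < k + xs.length := by
  intro xs
  induction xs with
  | nil => intro k p h; simp [PySem.List.enumerate] at h
  | cons x t ih =>
      intro k p h
      simp only [PySem.List.enumerate, List.mem_cons] at h
      rcases h with h | h
      · subst h; simp only [List.length_cons]; push_cast; omega
      · have := ih (k + 1) p h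
        simp only [List.length_cons]; push_cast; omega

lemma pv_events_bound (values : List (List (Option String))) :
    ∀ q ∈ pvEvents values, 0 ≤ q.1 ∧ q.1 < (values.length : Int) := by
  intro q hq
  unfold pvEvents at hq
  rw [List.mem_flatMap] at hq
  obtain ⟨p, hp, hq⟩ := hq
  have hb := pv_enumerate_mem values 0 p hp
  have : q.1 = p.1 := by
    split at hq
    · simp at hq
    · rw [List.mem_flatMap] at hq
      obtain ⟨e, _, hq⟩ := hq
      rw [List.mem_map] at hq
      obtain ⟨w, _, rfl⟩ := hq
      rfl
  omega

-- dense row l (A) vs sparse row s (B): same counts, nonnegative, nonzero only below m, some nonzero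
def pvGood (n : Nat) (m : Int) (l : List Int) (s : PySem.Dict Int Int) : Prop :=
  l.length = n ∧
  (∀ j : Nat, l.getD j 0 = s.getD (j : Int) 0) ∧
  (∀ j : Nat, 0 ≤ l.getD j 0) ∧
  (∀ j : Nat, l.getD j 0 ≠ 0 → (j : Int) < m) ∧
  (∃ j : Nat, l.getD j 0 ≠ 0)

-- the loop invariant tying A's state to B's
def pvInv (n : Nat) (dA : PySem.Dict String (List Int)) (dB : PySem.Dict String (PySem.Dict Int Int)) (m : Int) : Prop :=
  dA.keys = dB.keys ∧ dA.keys.Nodup ∧ 0 ≤ m ∧ m ≤ n ∧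
  (∀ w ∈ dA.keys, pvGood n m (dA.getD w []) (dB.getD w PySem.Dict.empty)) ∧
  (dA.keys = [] → m = 0) ∧
  (dA.keys ≠ [] → ∃ w ∈ dA.keys, (dA.getD w []).getD (m - 1).toNat 0 ≠ 0)

lemma pv_getD_set (l : List Int) (a : Nat) (v d : Int) (ha : a < l.length) (j : Nat) :
    (l.set a v).getD j d = if a = j then v else l.getD j d := by
  by_cases hj : j < l.length
  · rw [List.getD_eq_getElem?_getD, List.getD_eq_getElem?_getD, List.getElem?_set]
    split <;> simp_all
  · rw [List.getD_eq_getElem?_getD, List.getD_eq_getElem?_getD]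
    have h1 : l[j]? = none := by rw [List.getElem?_eq_none_iff]; omega
    have h2 : (l.set a v)[j]? = none := by rw [List.getElem?_eq_none_iff]; simp; omega
    rw [h1, h2]
    have : a ≠ j := by omega
    simp [this]

lemma pv_step (n : Nat) (dA : PySem.Dict String (List Int)) (dB : PySem.Dict String (PySem.Dict Int Int)) (m : Int)
    (q : Int × String) (hq0 : 0 ≤ q.1) (hqn : q.1 < (n : Int)) (h : pvInv n dA dB m) :
    pvInv n (pvStepA n dA q) (pvStepB (dB, m) q).1 (pvStepB (dB, m) q).2 := by
  obtain ⟨i, w⟩ := q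
  simp only at hq0 hqn
  obtain ⟨iN, rfl⟩ := Int.eq_ofNat_of_zero_le hq0
  have hiN : iN < n := by exact_mod_cast hqn
  obtain ⟨hkeys, hnodup, hm0, hmn, hgood, hempty, hwit⟩ := h
  simp only [pvStepA, pvStepB]
  set base := dA.getD w (List.replicate n 0) with hbase
  set inner := dB.getD w PySem.Dict.empty with hinner
  have hcont : dA.contains w = dB.contains w := by
    rw [PySem.Dict.contains_eq_decide_mem_keys, PySem.Dict.contains_eq_decide_mem_keys, hkeys]
  have hbase_eq : w ∈ dA.keys → base = dA.getD w [] := by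
    intro hw
    rcases hv : dA.get? w with _ | v
    · exact absurd ((PySem.Dict.get?_eq_none_iff_not_mem_keys _ _).1 hv) (by simpa using hw)
    · rw [hbase, PySem.Dict.getD_of_get?_eq_some _ _ hv, PySem.Dict.getD_of_get?_eq_some _ _ hv]
  have hrep : ∀ j : Nat, (List.replicate n (0:Int)).getD j 0 = 0 := by
    intro j
    rw [List.getD_eq_getElem?_getD, List.getElem?_replicate]
    split <;> rfl
  have hbf : base.length = n ∧ (∀ j : Nat, base.getD j 0 = inner.getD (j : Int) 0) ∧
      (∀ j : Nat, 0 ≤ base.getD j 0) ∧ (∀ j : Nat, base.getD j 0 ≠ 0 → (j : Int) < m) := by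
    by_cases hw : w ∈ dA.keys
    · have g := hgood w hw
      rw [← hbase_eq hw] at g
      exact ⟨g.1, g.2.1, g.2.2.1, g.2.2.2.1⟩
    · have hcA : dA.contains w = false := by
        rw [PySem.Dict.contains_eq_decide_mem_keys]; simp [hw]
      have hcB : dB.contains w = false := by rw [← hcont]; exact hcA
      rw [hbase, hinner, PySem.Dict.getD_of_not_contains _ _ hcA, PySem.Dict.getD_of_not_contains _ _ hcB]
      refine ⟨List.length_replicate, ?_, ?_, ?_⟩
      · intro j; rw [hrep j, PySem.Dict.getD_empty]
      · intro j; rw [hrep j]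
      · intro j hj; exact absurd (hrep j) hj
  obtain ⟨hblen, hbs, hbnn, hbbd⟩ := hbf
  have hlt : ((iN : Int) : Int) < (base.length : Int) := by rw [hblen]; exact_mod_cast hiN
  have hset : PySem.List.pySetD base (iN : Int) (PySem.List.pyGetD base (iN : Int) 0 + 1)
      = base.set iN (base.getD iN 0 + 1) := by
    simp [PySem.List.pySetD, PySem.List.pySet?, PySem.List.pyIdx?, hlt]
  rw [hset]
  have hnewgetD : ∀ j : Nat, (base.set iN (base.getD iN 0 + 1)).getD j 0
      = if iN = j then base.getD iN 0 + 1 else base.getD j 0 := by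
    intro j
    exact pv_getD_set base iN _ 0 (by omega) j
  have hni : ∀ j : Nat, (inner.insert (iN : Int) (inner.getD (iN : Int) 0 + 1)).getD (j : Int) 0
      = if iN = j then inner.getD (iN : Int) 0 + 1 else inner.getD (j : Int) 0 := by
    intro j
    rw [PySem.Dict.getD_insert]
    by_cases hij : iN = j
    · subst hij; simp
    · rw [if_neg (by intro hh; exact hij (by exact_mod_cast hh.symm)), if_neg hij]
  have hm'fact : m ≤ (if (iN : Int) + 1 > m then (iN : Int) + 1 else m) ∧
      (iN : Int) < (if (iN : Int) + 1 > m then (iN : Int) + 1 else m) ∧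
      0 ≤ (if (iN : Int) + 1 > m then (iN : Int) + 1 else m) ∧
      (if (iN : Int) + 1 > m then (iN : Int) + 1 else m) ≤ n := by
    split_ifs with hc
    · refine ⟨by omega, by omega, by omega, by omega⟩
    · refine ⟨le_refl m, by omega, hm0, hmn⟩
  refine ⟨?_, ?_, hm'fact.2.2.1, hm'fact.2.2.2, ?_, ?_, ?_⟩
  · cases hc : dA.contains w with
    | false =>
        rw [PySem.Dict.keys_insert_of_not_contains _ _ hc,
          PySem.Dict.keys_insert_of_not_contains _ _ (hcont ▸ hc), hkeys]
    | true =>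
        rw [PySem.Dict.keys_insert_of_contains _ _ hc,
          PySem.Dict.keys_insert_of_contains _ _ (hcont ▸ hc), hkeys]
  · exact PySem.Dict.nodup_keys_insert _ _ _ hnodup
  · intro w' hw'
    by_cases hww : w' = w
    · subst hww
      rw [PySem.Dict.getD_insert_self, PySem.Dict.getD_insert_self]
      refine ⟨by simp [hblen], ?_, ?_, ?_, ⟨iN, ?_⟩⟩
      · intro j
        rw [hnewgetD j, hni j]
        by_cases hij : iN = j
        · subst hij; rw [if_pos rfl, if_pos rfl, hbs iN]
        · rw [if_neg hij, if_neg hij, hbs j]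
      · intro j
        rw [hnewgetD j]
        split_ifs with hij
        · have := hbnn iN; omega
        · exact hbnn j
      · intro j hj
        rw [hnewgetD j] at hj
        split_ifs at hj with hij
        · subst hij; exact hm'fact.2.1
        · exact lt_of_lt_of_le (hbbd j hj) hm'fact.1
      · rw [hnewgetD iN, if_pos rfl]
        have := hbnn iN; omega
    · rw [PySem.Dict.getD_insert_of_ne _ _ _ hww, PySem.Dict.getD_insert_of_ne _ _ _ hww]
      have hw'' : w' ∈ dA.keys := by
        rw [PySem.Dict.mem_keys_insert] at hw'
        rcases hw' with h | h
        · exact absurd h hww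
        · exact h
      have g := hgood w' hw''
      exact ⟨g.1, g.2.1, g.2.2.1, fun j hj => lt_of_lt_of_le (g.2.2.2.1 j hj) hm'fact.1, g.2.2.2.2⟩
  · intro hk
    exfalso
    have : w ∈ (dA.insert w (base.set iN (base.getD iN 0 + 1))).keys :=
      (PySem.Dict.mem_keys_insert _ _ _ _).2 (Or.inl rfl)
    rw [hk] at this
    exact absurd this (List.not_mem_nil)
  · intro _
    by_cases hc : (iN : Int) + 1 > m
    · rw [if_pos hc]
      refine ⟨w, (PySem.Dict.mem_keys_insert _ _ _ _).2 (Or.inl rfl), ?_⟩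
      rw [PySem.Dict.getD_insert_self]
      have hto : ((iN : Int) + 1 - 1).toNat = iN := by omega
      rw [hto, hnewgetD iN, if_pos rfl]
      have := hbnn iN; omega
    · rw [if_neg hc]
      have hk : dA.keys ≠ [] := by
        intro hnil
        have := hempty hnil
        omega
      obtain ⟨w0, hw0, hnz0⟩ := hwit hk
      by_cases hww : w0 = w
      · subst hww
        refine ⟨w0, (PySem.Dict.mem_keys_insert _ _ _ _).2 (Or.inl rfl), ?_⟩
        rw [PySem.Dict.getD_insert_self, hnewgetD ((m - 1).toNat)]
        split_ifs with hij
        · have := hbnn iN; omega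
        · rw [hbase_eq hw0]; exact hnz0
      · refine ⟨w0, (PySem.Dict.mem_keys_insert _ _ _ _).2 (Or.inr hw0), ?_⟩
        rw [PySem.Dict.getD_insert_of_ne _ _ _ hww]
        exact hnz0

lemma pv_fold (n : Nat) (E : List (Int × String)) (hE : ∀ q ∈ E, 0 ≤ q.1 ∧ q.1 < (n : Int)) :
    ∀ (dA : PySem.Dict String (List Int)) (st : PySem.Dict String (PySem.Dict Int Int) × Int),
      pvInv n dA st.1 st.2 →
      pvInv n (E.foldl (pvStepA n) dA) (E.foldl pvStepB st).1 (E.foldl pvStepB st).2 := by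
  induction E with
  | nil => intro dA st h; simpa using h
  | cons q E ih =>
      intro dA st h
      simp only [List.foldl_cons]
      refine ih (fun q hq => hE q (List.mem_cons_of_mem _ hq)) _ _ ?_
      have hq := hE q (List.mem_cons_self)
      have := pv_step n dA st.1 st.2 q hq.1 hq.2 (by simpa using h)
      simpa using this

lemma pv_take_eq_map_range (l : List Int) (m : Nat) (hm : m ≤ l.length) :
    l.take m = (List.range m).map (fun j => l.getD j 0) := by
  apply List.ext_getElem
  · simp; omega
  · intro i h1 h2
    simp only [List.getElem_take, List.getElem_map, List.getElem_range]
    rw [List.getD_eq_getElem?_getD, List.getElem?_eq_getElem (by simp at h1; omega)]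
    rfl

lemma pv_lastNZ_aux (l : List Int) : ∀ b : Nat, (∃ j, j < b ∧ l.getD j 0 ≠ 0) →
    ∃ j : Nat, j < b ∧
      ((List.range b).map (fun k : Nat => (b : Int) - 1 - (k : Int))).find? (fun i => decide (PySem.List.pyGetD l i 0 ≠ 0)) = some (j : Int) ∧
      l.getD j 0 ≠ 0 ∧ ∀ k, j < k → k < b → l.getD k 0 = 0 := by
  intro b
  induction b with
  | zero => intro h; obtain ⟨j, hj, _⟩ := h; omega
  | succ c ih =>
      intro h
      have hrange : (List.range (c + 1)).map (fun k : Nat => ((c + 1 : Nat) : Int) - 1 - (k : Int))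
          = ((c : Nat) : Int) :: (List.range c).map (fun k : Nat => ((c : Nat) : Int) - 1 - (k : Int)) := by
        rw [List.range_succ_eq_map, List.map_cons, List.map_map]
        congr 1
        · push_cast; ring
        · apply List.map_congr_left
          intro k _
          simp only [Function.comp_apply]
          push_cast; ring
      rw [hrange]
      by_cases hc : l.getD c 0 ≠ 0
      · rw [List.find?_cons_of_pos (by simp only [PySem.List.pyGetD_natCast]; simpa using hc)]
        exact ⟨c, by omega, rfl, hc, fun k h1 h2 => by omega⟩
      · rw [not_not] at hc
        rw [List.find?_cons_of_neg (by simp only [PySem.List.pyGetD_natCast, hc]; decide)]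
        obtain ⟨j, hj, hnz⟩ := h
        have hj' : j < c := by
          rcases Nat.lt_succ_iff_lt_or_eq.1 hj with h' | h'
          · exact h'
          · subst h'; exact absurd hc hnz
        obtain ⟨j, hjb, hf, hnz', hz⟩ := ih ⟨j, hj', hnz⟩
        refine ⟨j, by omega, hf, hnz', ?_⟩
        intro k h1 h2
        by_cases hkc : k < c
        · exact hz k h1 hkc
        · have : k = c := by omega
          subst this; exact hc

lemma pv_pyRange_desc (b : Nat) :
    PySem.List.pyRange ((b : Int) - 1) (-1) (-1) = (List.range b).map (fun k : Nat => (b : Int) - 1 - (k : Int)) := by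
  by_cases hb : b = 0
  · subst hb; simp [PySem.List.pyRange]
  · simp only [PySem.List.pyRange]
    rw [if_neg (by norm_num)]
    rw [if_neg (by norm_num)]
    rw [if_pos (by omega)]
    have hdiv : ((b : Int) - 1 - -1 + - -1 - 1) / - -1 = (b : Int) := by norm_num
    rw [hdiv, Int.toNat_natCast]
    apply List.map_congr_left
    intro k _
    ring

lemma pv_lastNZ_spec (l : List Int) (h : ∃ j : Nat, l.getD j 0 ≠ 0) :
    ∃ j : Nat, pvLastNZ l = some (j : Int) ∧ l.getD j 0 ≠ 0 ∧ ∀ k : Nat, j < k → l.getD k 0 = 0 := by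
  have hlen : ∀ j : Nat, l.getD j 0 ≠ 0 → j < l.length := by
    intro j hj
    by_contra hge
    rw [List.getD_eq_getElem?_getD, List.getElem?_eq_none_iff.2 (by omega)] at hj
    simp at hj
  obtain ⟨j0, hj0⟩ := h
  obtain ⟨j, hjb, hfind, hnz, hz⟩ := pv_lastNZ_aux l l.length ⟨j0, hlen j0 hj0, hj0⟩
  refine ⟨j, ?_, hnz, ?_⟩
  · unfold pvLastNZ
    rw [pv_pyRange_desc l.length]
    exact hfind
  · intro k hk
    by_cases hkb : k < l.length
    · exact hz k hk hkb
    · rw [List.getD_eq_getElem?_getD, List.getElem?_eq_none_iff.2 (by omega)]; rfl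

lemma pv_foldl_fmax_ub {α : Type} (L : List α) (f : α → Int) (m : Int) (hub : ∀ x ∈ L, f x ≤ m) :
    ∀ acc, acc ≤ m → L.foldl (fun a x => max a (f x)) acc ≤ m := by
  induction L with
  | nil => intro acc h; simpa using h
  | cons y t ih =>
      intro acc h
      simp only [List.foldl_cons]
      exact ih (fun x hx => hub x (List.mem_cons_of_mem _ hx)) _
        (max_le h (hub y List.mem_cons_self))

lemma pv_foldl_fmax_ge {α : Type} (L : List α) (f : α → Int) :
    ∀ acc, acc ≤ L.foldl (fun a x => max a (f x)) acc ∧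
      ∀ x ∈ L, f x ≤ L.foldl (fun a x => max a (f x)) acc := by
  induction L with
  | nil => intro acc; exact ⟨le_refl _, by simp⟩
  | cons y t ih =>
      intro acc
      simp only [List.foldl_cons]
      obtain ⟨h1, h2⟩ := ih (max acc (f y))
      refine ⟨le_trans (le_max_left _ _) h1, ?_⟩
      intro x hx
      rcases List.mem_cons.1 hx with h | h
      · subst h; exact le_trans (le_max_right _ _) h1
      · exact h2 x h

lemma pv_foldl_fmax_eq {α : Type} (L : List α) (f : α → Int) (m : Int) (h0 : 0 ≤ m)
    (hub : ∀ x ∈ L, f x ≤ m) (hw : ∃ x ∈ L, f x = m) :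
    L.foldl (fun a x => max a (f x)) 0 = m := by
  obtain ⟨x0, hx0, hfx0⟩ := hw
  have h1 := pv_foldl_fmax_ub L f m hub 0 h0
  have h2 := (pv_foldl_fmax_ge L f 0).2 x0 hx0
  omega

-- maxLen computed by A's trim pass equals B's running max
lemma pv_maxlen (n : Nat) (dA : PySem.Dict String (List Int)) (dB : PySem.Dict String (PySem.Dict Int Int)) (m : Int)
    (h : pvInv n dA dB m) :
    dA.values.foldl (fun acc l => match pvLastNZ l with | some i => max acc (i + 1) | none => acc) 0 = m := by
  obtain ⟨hkeys, hnodup, hm0, hmn, hgood, hempty, hwit⟩ := h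
  by_cases hk : dA.keys = []
  · have hv : dA.values = [] := by
      rw [PySem.Dict.values_eq_map_keys dA hnodup [], hk]; rfl
    rw [hv, hempty hk]; rfl
  · rw [PySem.Dict.values_eq_map_keys dA hnodup [], List.foldl_map]
    have hcong : ∀ acc : Int, ∀ w ∈ dA.keys,
        (match pvLastNZ (dA.getD w []) with | some i => max acc (i + 1) | none => acc)
        = max acc ((pvLastNZ (dA.getD w [])).elim 0 (· + 1)) := by
      intro acc w hw
      obtain ⟨j, hfind, _, _⟩ := pv_lastNZ_spec _ (hgood w hw).2.2.2.2
      rw [hfind]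
      rfl
    rw [PySem.List.foldl_congr_mem _ _ (fun acc w => max acc ((pvLastNZ (dA.getD w [])).elim 0 (· + 1))) 0 hcong]
    apply pv_foldl_fmax_eq _ _ m hm0
    · intro w hw
      obtain ⟨j, hfind, hnz, _⟩ := pv_lastNZ_spec _ (hgood w hw).2.2.2.2
      rw [hfind]
      have := (hgood w hw).2.2.2.1 j hnz
      simp only [Option.elim]
      omega
    · obtain ⟨w0, hw0, hnz0⟩ := hwit hk
      refine ⟨w0, hw0, ?_⟩
      obtain ⟨j, hfind, hnz, hz⟩ := pv_lastNZ_spec _ (hgood w0 hw0).2.2.2.2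
      rw [hfind]
      have hjm := (hgood w0 hw0).2.2.2.1 j hnz
      have hge : (m - 1).toNat ≤ j := by
        by_contra hlt
        rw [Nat.not_le] at hlt
        exact hnz0 (hz _ hlt)
      simp only [Option.elim]
      omega

lemma pv_final (n : Nat) (dA : PySem.Dict String (List Int)) (dB : PySem.Dict String (PySem.Dict Int Int)) (m : Int)
    (h : pvInv n dA dB m) :
    ((pvTrimZeros dA).keys, (pvTrimZeros dA).values) =
      (dB.keys, dB.keys.map (fun w => (PySem.List.pyRange 0 m 1).map (fun j => (dB.getD w PySem.Dict.empty).getD j 0))) := by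
  have hmax := pv_maxlen n dA dB m h
  obtain ⟨hkeys, hnodup, hm0, hmn, hgood, hempty, hwit⟩ := h
  simp only [pvTrimZeros, hmax]
  rw [PySem.Dict.items_eq_map_keys dA hnodup []]
  refine Prod.ext ?_ ?_
  · show (PySem.Dict.mk _).keys = dB.keys
    rw [PySem.Dict.keys_mk]
    simp [List.map_map, Function.comp_def, hkeys]
  · show (PySem.Dict.mk _).values = _
    have hvals : (PySem.Dict.mk ((dA.keys.map (fun k => (k, dA.getD k []))).map
        (fun p => (p.1, PySem.List.slice p.2 none (some m))))).values
        = dA.keys.map (fun w => PySem.List.slice (dA.getD w []) none (some m)) := by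
      simp [PySem.Dict.values, List.map_map, Function.comp_def]
    rw [hvals, hkeys]
    apply List.map_congr_left
    intro w hw
    have g := hgood w (hkeys ▸ hw)
    rw [PySem.List.slice_to _ hm0]
    have hmn' : m.toNat ≤ (dA.getD w []).length := by rw [g.1]; omega
    rw [pv_take_eq_map_range _ _ hmn']
    have hmcast : m = ((m.toNat : Nat) : Int) := by omega
    rw [hmcast, PySem.List.pyRange_zero_natCast, List.map_map]
    apply List.map_congr_left
    intro j _
    simp only [Function.comp]
    exact g.2.1 j

lemma pv_inv_init (n : Nat) : pvInv n PySem.Dict.empty PySem.Dict.empty 0 := by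
  refine ⟨rfl, by simp [PySem.Dict.keys_empty], le_refl 0, by exact_mod_cast Int.natCast_nonneg n, ?_, fun _ => rfl, ?_⟩
  · intro w hw
    rw [PySem.Dict.keys_empty] at hw
    exact absurd hw (List.not_mem_nil)
  · intro hne
    exact absurd PySem.Dict.keys_empty hne

-- ===== VERDICT (by name: the statement is the Claim_ definition above) =====
theorem get_time_series_from_string_spec : Claim_equal_get_time_series_from_string := by
  intro data_dict key _ hpre
  unfold Spec_get_time_series_from_string
  unfold get_time_series_from_string get_time_series_from_string_alt
  have hsome : ∃ values, (PySem.Dict.mk data_dict).get? key = some values := by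
    rcases hv : (PySem.Dict.mk data_dict).get? key with _ | values
    · exfalso
      rw [PySem.Dict.get?_eq_none_iff_not_mem_keys] at hv
      rw [PySem.Dict.keys_mk] at hv
      exact hv hpre
    · exact ⟨values, rfl⟩
  obtain ⟨values, hv⟩ := hsome
  simp only [hv]
  have hA : (PySem.List.enumerate values 0).foldl
      (fun d p =>
        if none ∈ p.2 then d
        else p.2.foldl (fun d e =>
          (pvWords e).foldl (fun d w =>
            d.insert w (PySem.List.pySetD (d.getD w (List.replicate values.length 0)) p.1
              (PySem.List.pyGetD (d.getD w (List.replicate values.length 0)) p.1 0 + 1))) d) d)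
      PySem.Dict.empty
      = (pvEvents values).foldl (pvStepA values.length) PySem.Dict.empty :=
    pv_nested_fold (PySem.List.enumerate values 0) (pvStepA values.length) PySem.Dict.empty
  have hB : (PySem.List.enumerate values 0).foldl
      (fun (st : PySem.Dict String (PySem.Dict Int Int) × Int) p =>
        if none ∈ p.2 then st
        else p.2.foldl (fun st e =>
          (pvWords e).foldl (fun st w =>
            (st.1.insert w ((st.1.getD w PySem.Dict.empty).insert p.1
              ((st.1.getD w PySem.Dict.empty).getD p.1 0 + 1)),
             if p.1 + 1 > st.2 then p.1 + 1 else st.2)) st) st)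
      (PySem.Dict.empty, 0)
      = (pvEvents values).foldl pvStepB (PySem.Dict.empty, 0) :=
    pv_nested_fold (PySem.List.enumerate values 0) pvStepB (PySem.Dict.empty, 0)
  rw [hA, hB]
  exact pv_final values.length _ _ _
    (pv_fold values.length (pvEvents values) (pv_events_bound values)
      PySem.Dict.empty (PySem.Dict.empty, 0) (pv_inv_init values.length))
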